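-- pv_equiv track=rewrite | github.com/Ascend/pytorch | torch_npu/_inductor/fx_passes/utils/schedule_node_utils.py | make_disjoint
-- ===== SOURCE A (Python) =====
-- def make_disjoint(anc_sets):
--     result = []
--     seen = set()
--     for s in anc_sets:
--         cleaned = s - seen
--         result.append(cleaned)
--         seen |= s
--     return result
-- ===== SOURCE B (Python) =====
-- def make_disjoint(anc_sets):
--     first = {}
--     for i, s in enumerate(anc_sets):
--         for e in s:
--             if e not in first:
--                 first[e] = i
--     return [{e for e in s if first[e] == i} for i, s in enumerate(anc_sets)]
-- ===== Notes on version B (the rewrite author's own statement) =====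
-- stated objective: alternative
-- what changed: Replaces the running-union `seen` accumulator with a precomputed first-occurrence dict built in one pass, then a second pass keeps exactly the elements whose first occurrence is the current index.
import Mathlib
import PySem

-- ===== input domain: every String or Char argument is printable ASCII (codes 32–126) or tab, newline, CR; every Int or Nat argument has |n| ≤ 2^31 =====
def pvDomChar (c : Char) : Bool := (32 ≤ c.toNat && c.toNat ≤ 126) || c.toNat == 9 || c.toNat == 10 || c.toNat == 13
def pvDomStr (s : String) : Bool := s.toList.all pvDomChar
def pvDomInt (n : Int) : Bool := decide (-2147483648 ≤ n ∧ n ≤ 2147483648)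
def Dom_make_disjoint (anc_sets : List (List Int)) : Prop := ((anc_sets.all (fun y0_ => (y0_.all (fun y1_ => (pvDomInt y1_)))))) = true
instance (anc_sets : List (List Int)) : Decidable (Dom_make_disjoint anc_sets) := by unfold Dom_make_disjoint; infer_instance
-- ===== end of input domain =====

-- B replaces A's running-union `seen` accumulator by a precomputed first-occurrence
-- dict and a second filtering pass (alternative decomposition, same asymptotic cost).


-- ===== PORT A =====
-- Each inner list models a Python set: PySem.Set.ofList gives its distinct elements.
def make_disjoint (anc_sets : List (List Int)) : List (List Int) :=
  (anc_sets.foldl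
    (fun (acc : List (List Int) × PySem.Set Int) s =>
      let ss := PySem.Set.ofList s
      (acc.1 ++ [PySem.Set.diff ss acc.2], PySem.Set.union acc.2 ss))
    ([], PySem.Set.empty)).1

-- ===== PORT B =====
def make_disjoint_alt (anc_sets : List (List Int)) : List (List Int) :=
  let first : PySem.Dict Int Int :=
    (PySem.List.enumerate anc_sets).foldl
      (fun d p => (PySem.Set.ofList p.2).foldl
        (fun d e => if d.contains e then d else d.insert e p.1) d)
      PySem.Dict.empty
  (PySem.List.enumerate anc_sets).map
    (fun p => (PySem.Set.ofList p.2).filter (fun e => first.get? e == some p.1))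

-- ===== PRECONDITION & SPEC =====
def Spec_make_disjoint (anc_sets : List (List Int)) (out : List (List Int)) : Prop := out = make_disjoint_alt anc_sets
instance (anc_sets : List (List Int)) (out : List (List Int)) : Decidable (Spec_make_disjoint anc_sets out) := by unfold Spec_make_disjoint; infer_instance

-- ===== CLAIM (what is proved, stated in full; the proofs are below) =====
def Claim_equal_make_disjoint : Prop := ∀ (anc_sets : List (List Int)), Dom_make_disjoint anc_sets → Spec_make_disjoint anc_sets (make_disjoint anc_sets)

-- ===== LEMMAS AND PROOFS =====

def insAll (d : PySem.Dict Int Int) (i : Int) (s : List Int) : PySem.Dict Int Int :=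
  s.foldl (fun d e => if d.contains e then d else d.insert e i) d

theorem get?_insAll (s : List Int) :
    ∀ (d : PySem.Dict Int Int) (i e : Int),
    (insAll d i s).get? e =
      if d.contains e then d.get? e else if e ∈ s then some i else none := by
  induction s with
  | nil =>
    intro d i e
    by_cases he : d.contains e = true
    · simp [insAll, he]
    · simp only [insAll, List.foldl_nil, List.not_mem_nil, if_false, he, Bool.false_eq_true]
      rw [PySem.Dict.get?_eq_none_iff_contains]
      simpa using he
  | cons a rest ih =>
    intro d i e
    show (insAll (if d.contains a then d else d.insert a i) i rest).get? e = _
    by_cases ha : d.contains a = true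
    · rw [if_pos ha, ih]
      by_cases he : d.contains e = true
      · simp [he]
      · have : e ≠ a := fun h => he (h ▸ ha)
        simp [he, List.mem_cons, this]
    · rw [if_neg ha, ih]
      by_cases hea : e = a
      · subst hea
        simp [PySem.Dict.contains_insert_self, PySem.Dict.get?_insert_self, ha]
      · have h2 : (e == a) = false := by simp [hea]
        simp [PySem.Dict.contains_insert, PySem.Dict.get?_insert, hea, h2, List.mem_cons]

theorem contains_of_get?_some (d : PySem.Dict Int Int) (e v : Int) (h : d.get? e = some v) :
    d.contains e = true := by
  by_contra hc
  have h2 : d.get? e = none := by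
    rw [PySem.Dict.get?_eq_none_iff_contains]; simpa using hc
  simp [h] at h2

theorem some_of_contains (d : PySem.Dict Int Int) (e : Int) (h : d.contains e = true) :
    ∃ v, d.get? e = some v := by
  cases hg : d.get? e with
  | none => rw [PySem.Dict.get?_eq_none_iff_contains] at hg; simp [h] at hg
  | some v => exact ⟨v, rfl⟩

theorem contains_insAll (s : List Int) (d : PySem.Dict Int Int) (i e : Int) :
    (insAll d i s).contains e = true ↔ d.contains e = true ∨ e ∈ s := by
  constructor
  · intro hc
    obtain ⟨v, hv⟩ := some_of_contains _ _ hc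
    rw [get?_insAll] at hv
    by_cases hd : d.contains e = true
    · exact Or.inl hd
    · simp only [hd, if_false, Bool.false_eq_true] at hv
      by_cases hm : e ∈ s
      · exact Or.inr hm
      · simp [hm] at hv
  · intro hc
    have : (insAll d i s).get? e ≠ none := by
      rw [get?_insAll]
      by_cases hd : d.contains e = true
      · simp only [hd, if_true]
        obtain ⟨v, hv⟩ := some_of_contains _ _ hd
        simp [hv]
      · rcases hc with hc | hc
        · exact absurd hc hd
        · simp [hd, hc]
    by_contra hcf
    apply this
    rw [PySem.Dict.get?_eq_none_iff_contains]; simpa using hcf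

def tbl (l : List (Int × List Int)) (d : PySem.Dict Int Int) : PySem.Dict Int Int :=
  l.foldl
    (fun d p => (PySem.Set.ofList p.2).foldl
      (fun d e => if d.contains e then d else d.insert e p.1) d) d

theorem tbl_mono (l : List (Int × List Int)) :
    ∀ (d : PySem.Dict Int Int) (e v : Int), d.get? e = some v → (tbl l d).get? e = some v := by
  induction l with
  | nil => intro d e v h; exact h
  | cons p rest ih =>
    intro d e v h
    show (tbl rest (insAll d p.1 (PySem.Set.ofList p.2))).get? e = some v
    apply ih
    rw [get?_insAll, if_pos (contains_of_get?_some d e v h)]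
    exact h

def aGo (seen : PySem.Set Int) : List (List Int) → List (List Int)
  | [] => []
  | s :: rest =>
      PySem.Set.diff (PySem.Set.ofList s) seen ::
        aGo (PySem.Set.union seen (PySem.Set.ofList s)) rest

theorem main_lemma (l : List (List Int)) :
    ∀ (i : Int) (seen : PySem.Set Int) (d : PySem.Dict Int Int),
    (∀ e, e ∈ seen ↔ d.contains e = true) →
    (∀ e v, d.get? e = some v → v < i) →
    aGo seen l =
      (PySem.List.enumerate l i).map
        (fun p => (PySem.Set.ofList p.2).filter
          (fun e => (tbl (PySem.List.enumerate l i) d).get? e == some p.1)) := by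
  induction l with
  | nil => intro i seen d _ _; simp [aGo, PySem.List.enumerate_nil]
  | cons s rest ih =>
    intro i seen d hinv hlt
    rw [PySem.List.enumerate_cons]
    have htbl : tbl ((i, s) :: PySem.List.enumerate rest (i + 1)) d
        = tbl (PySem.List.enumerate rest (i + 1)) (insAll d i (PySem.Set.ofList s)) := rfl
    rw [htbl]
    set d' := insAll d i (PySem.Set.ofList s) with hd'
    set T := tbl (PySem.List.enumerate rest (i + 1)) d' with hT
    show aGo seen (s :: rest) = _
    rw [List.map_cons]
    have hhead : PySem.Set.diff (PySem.Set.ofList s) seen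
        = (PySem.Set.ofList s).filter (fun e => T.get? e == some i) := by
      show (PySem.Set.ofList s).filter (fun e => !PySem.Set.contains seen e) = _
      apply List.filter_congr
      intro e he
      by_cases hc : e ∈ seen
      · have hdc : d.contains e = true := (hinv e).mp hc
        obtain ⟨v, hv⟩ := some_of_contains d e hdc
        have hvT : T.get? e = some v := by
          apply tbl_mono
          rw [hd', get?_insAll, if_pos hdc]; exact hv
        have hvne : v ≠ i := ne_of_lt (hlt e v hv)
        simp [hc, hvT, hvne]
      · have hdc : d.contains e = false := by
          by_contra h
          exact hc ((hinv e).mpr (by simpa using h))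
        have hvT : T.get? e = some i := by
          apply tbl_mono
          rw [hd', get?_insAll]
          simp [hdc, he]
        simp [hc, hvT]
    rw [aGo, hhead]
    congr 1
    apply ih (i + 1) (PySem.Set.union seen (PySem.Set.ofList s)) d'
    · intro e
      rw [show PySem.Set.union seen (PySem.Set.ofList s) = PySem.Set.update seen (PySem.Set.ofList s) from rfl]
      rw [PySem.Set.mem_update, hd', contains_insAll]
      simp [hinv e, PySem.Set.mem_ofList]
    · intro e v hv
      rw [hd', get?_insAll] at hv
      by_cases hdc : d.contains e = true
      · rw [if_pos hdc] at hv
        exact lt_trans (hlt e v hv) (by omega)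
      · simp only [hdc, if_false, Bool.false_eq_true] at hv
        by_cases hm : e ∈ PySem.Set.ofList s
        · simp [hm] at hv; omega
        · simp [hm] at hv

theorem foldA (l : List (List Int)) :
    ∀ (res : List (List Int)) (seen : PySem.Set Int),
    (l.foldl
      (fun (acc : List (List Int) × PySem.Set Int) s =>
        let ss := PySem.Set.ofList s
        (acc.1 ++ [PySem.Set.diff ss acc.2], PySem.Set.union acc.2 ss))
      (res, seen)).1 = res ++ aGo seen l := by
  induction l with
  | nil => intro res seen; simp [aGo]
  | cons s rest ih => intro res seen; simp [List.foldl, aGo, ih]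

-- ===== VERDICT (by name: the statement is the Claim_ definition above) =====
theorem make_disjoint_spec : Claim_equal_make_disjoint := by
  intro anc_sets _
  unfold Spec_make_disjoint make_disjoint make_disjoint_alt
  rw [foldA]
  simp only [List.nil_append]
  exact main_lemma anc_sets 0 PySem.Set.empty PySem.Dict.empty
    (by intro e; simp [PySem.Set.empty, PySem.Dict.contains_empty])
    (by intro e v h; simp [PySem.Dict.get?_empty] at h)
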